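-- pv_equiv track=rewrite | github.com/WuZheng0216/wargame2025 | analyze_lowcost_trajectory_diagnostics.py | _latest_detect_before
-- ===== SOURCE A (Python) =====
-- from typing import Any, Dict, List, Optional
--
-- def _latest_detect_before(history: Dict[str, List[dict]], target_id: str, sim_time: int) -> Optional[dict]:
--     samples = history.get(target_id, [])
--     candidate = None
--     for sample in samples:
--         if int(sample["sim_time"]) <= int(sim_time):
--             candidate = sample
--         else:
--             break
--     return candidate
-- ===== SOURCE B (Python) =====
-- from typing import Dict, List, Optional
--
--
-- def _latest_detect_before(history: Dict[str, List[dict]], target_id: str, sim_time: int) -> Optional[dict]: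
--     # Binary search for the boundary: samples are a timeline, sorted ascending by
--     # sim_time, so the last sample with sim_time <= target is samples[lo-1] where
--     # lo is the bisect-right insertion point.  O(log n) instead of A's linear scan.
--     samples = history.get(target_id, [])
--     lo, hi = 0, len(samples)
--     while lo < hi:
--         mid = (lo + hi) // 2
--         if int(samples[mid]["sim_time"]) <= int(sim_time):
--             lo = mid + 1
--         else:
--             hi = mid
--     return samples[lo - 1] if lo > 0 else None
-- ===== Notes on version B (the rewrite author's own statement) =====
-- stated objective: faster
-- what changed: Replaces A's linear prefix scan with a hand-written binary search (bisect-right) for the boundary index on the sim_time-sorted sample list, returning samples[lo-1].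
-- outside the precondition, e.g. on _latest_detect_before({'t': [{'sim_time': 9}, {'sim_time': 5}]}, 't', 6): A returns None, B returns {'sim_time': 5}; on _latest_detect_before({'t': [{'x': 0}]}, 't', 6): A raises KeyError, B raises KeyError
import Mathlib
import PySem

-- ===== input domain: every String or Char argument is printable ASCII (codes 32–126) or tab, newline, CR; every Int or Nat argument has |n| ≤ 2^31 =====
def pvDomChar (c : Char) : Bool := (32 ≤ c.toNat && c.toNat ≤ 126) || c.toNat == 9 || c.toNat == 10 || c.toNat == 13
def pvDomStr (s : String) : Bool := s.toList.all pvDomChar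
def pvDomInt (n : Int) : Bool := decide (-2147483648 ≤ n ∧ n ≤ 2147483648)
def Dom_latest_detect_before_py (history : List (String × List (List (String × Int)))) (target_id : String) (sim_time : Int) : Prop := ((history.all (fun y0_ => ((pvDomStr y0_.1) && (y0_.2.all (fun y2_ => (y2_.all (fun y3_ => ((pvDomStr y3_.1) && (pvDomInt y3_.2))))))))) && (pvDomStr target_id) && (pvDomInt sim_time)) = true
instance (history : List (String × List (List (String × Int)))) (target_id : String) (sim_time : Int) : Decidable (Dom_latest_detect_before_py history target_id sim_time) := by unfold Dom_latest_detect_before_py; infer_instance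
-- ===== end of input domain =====

-- B replaces A's linear prefix scan by a binary search for the boundary index on the
-- sim_time-sorted sample list (A's break assumes that order); faster asymptotically.

-- ===== PORT A =====
-- A's loop: candidate accumulator, break at the first sample whose sim_time exceeds the
-- target.  On a scanned sample missing the "sim_time" key Python raises KeyError
-- (excluded by Pre_); the port returns none there, a value the claim never reaches.
def pvGoA (sim_time : Int) : List (List (String × Int)) → Option (List (String × Int)) → Option (List (String × Int))
  | [], candidate => candidate
  | s :: rest, candidate =>
    match PySem.Dict.get? (PySem.Dict.mk s) "sim_time" with
    | none => none
    | some t => if t ≤ sim_time then pvGoA sim_time rest (some s) else candidate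

def latest_detect_before_py (history : List (String × List (List (String × Int)))) (target_id : String) (sim_time : Int) : Option (List (String × Int)) :=
  pvGoA sim_time (PySem.Dict.getD (PySem.Dict.mk history) target_id []) none

-- ===== PORT B =====
-- the while-loop of Source B: lo/hi bisection; `samples[mid]["sim_time"]` ported with getD 0
-- (under Pre_ every sample carries the key, and mid is always in range so getD mid [] is
-- exact); Python raises KeyError on a probed sample missing the key (excluded by Pre_).
-- dict lookup s["sim_time"] (getD 0; Pre_ guarantees the key is present)
def pvT (s : List (String × Int)) : Int := PySem.Dict.getD (PySem.Dict.mk s) "sim_time" 0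

def pvBS (sim_time : Int) (samples : List (List (String × Int))) (lo hi : Nat) : Nat :=
  if h : lo < hi then
    let mid := (lo + hi) / 2
    if pvT (samples.getD mid []) ≤ sim_time then
      pvBS sim_time samples (mid + 1) hi
    else
      pvBS sim_time samples lo mid
  else lo
termination_by hi - lo
decreasing_by all_goals omega

def latest_detect_before_py_alt (history : List (String × List (List (String × Int)))) (target_id : String) (sim_time : Int) : Option (List (String × Int)) :=
  let samples := PySem.Dict.getD (PySem.Dict.mk history) target_id []
  let lo := pvBS sim_time samples 0 samples.length
  if lo > 0 then samples[lo - 1]? else none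

-- ===== PRECONDITION & SPEC =====
-- Python A raises KeyError on a scanned sample lacking the key "sim_time", and A's
-- early break only computes 'the latest sample with sim_time <= target' when the
-- samples are time-ordered; Pre_ therefore requires the key in every sample of the
-- target's list and the list nondecreasing in sim_time (the timeline contract).  This
-- excludes some inputs on which A still returns a value: a missing key after the break
-- point, and unsorted lists, where A's break makes the result an artefact of the scan
-- order (see claim.json cites).
def Pre_latest_detect_before_py (history : List (String × List (List (String × Int)))) (target_id : String) (sim_time : Int) : Prop :=
  (∀ s ∈ PySem.Dict.getD (PySem.Dict.mk history) target_id [],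
      (PySem.Dict.get? (PySem.Dict.mk s) "sim_time").isSome = true) ∧
  (PySem.Dict.getD (PySem.Dict.mk history) target_id []).Pairwise (fun a b => pvT a ≤ pvT b)
instance (history : List (String × List (List (String × Int)))) (target_id : String) (sim_time : Int) : Decidable (Pre_latest_detect_before_py history target_id sim_time) := by unfold Pre_latest_detect_before_py; infer_instance

def pvWitness_latest_detect_before_py : (List (String × List (List (String × Int)))) × String × Int :=
  ([("t", [[("sim_time", 1)], [("sim_time", 5)], [("sim_time", 9)]])], "t", 6)

def Spec_latest_detect_before_py (history : List (String × List (List (String × Int)))) (target_id : String) (sim_time : Int) (out : Option (List (String × Int))) : Prop := out = latest_detect_before_py_alt history target_id sim_time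
instance (history : List (String × List (List (String × Int)))) (target_id : String) (sim_time : Int) (out : Option (List (String × Int))) : Decidable (Spec_latest_detect_before_py history target_id sim_time out) := by unfold Spec_latest_detect_before_py; infer_instance

-- ===== CLAIM (what is proved, stated in full; the proofs are below) =====
def Claim_equal_latest_detect_before_py : Prop := ∀ (history : List (String × List (List (String × Int)))) (target_id : String) (sim_time : Int), Dom_latest_detect_before_py history target_id sim_time → Pre_latest_detect_before_py history target_id sim_time → Spec_latest_detect_before_py history target_id sim_time (latest_detect_before_py history target_id sim_time)

-- ===== LEMMAS AND PROOFS =====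

-- A's loop with accumulator c computes the last element of the qualifying takeWhile
-- prefix, falling back to c when that prefix is empty.
theorem pvGoA_eq (sim_time : Int) (samples : List (List (String × Int)))
    (h : ∀ s ∈ samples, (PySem.Dict.get? (PySem.Dict.mk s) "sim_time").isSome = true)
    (c : Option (List (String × Int))) :
    pvGoA sim_time samples c =
      ((samples.takeWhile (fun s => pvT s ≤ sim_time)).getLast?).or c := by
  induction samples generalizing c with
  | nil => simp [pvGoA]
  | cons s rest ih =>
    have hs := h s (by simp)
    obtain ⟨t, ht⟩ := Option.isSome_iff_exists.mp hs
    have hrest : ∀ x ∈ rest, (PySem.Dict.get? (PySem.Dict.mk x) "sim_time").isSome = true :=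
      fun x hx => h x (List.mem_cons_of_mem _ hx)
    have hgd : pvT s = t := by
      unfold pvT; rw [PySem.Dict.getD_eq_get?_getD, ht]; rfl
    by_cases hle : t ≤ sim_time
    · simp only [pvGoA, ht, hle, if_pos, List.takeWhile_cons, hgd, decide_eq_true_eq,
        ih hrest]
      rw [List.getLast?_cons]
      cases (rest.takeWhile (fun s => pvT s ≤ sim_time)).getLast? <;> simp
    · simp [pvGoA, ht, hle, hgd]

-- for a nondecreasing list, membership in the takeWhile prefix is an index threshold
theorem pvThreshold (sim_time : Int) (l : List (List (String × Int)))
    (mono : l.Pairwise (fun a b => pvT a ≤ pvT b)) :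
    ∀ i (h : i < l.length),
      (pvT l[i] ≤ sim_time ↔ i < (l.takeWhile (fun s => pvT s ≤ sim_time)).length) := by
  induction l with
  | nil => intro i h; simp at h
  | cons a rest ih =>
    have mono' := (List.pairwise_cons.mp mono).2
    have ha := (List.pairwise_cons.mp mono).1
    intro i h
    by_cases hle : pvT a ≤ sim_time
    · cases i with
      | zero => simp [List.takeWhile_cons, hle]
      | succ j =>
        have hj : j < rest.length := by simpa using h
        simpa [hle, Nat.succ_lt_succ_iff] using ih mono' j hj
    · have hk : (List.takeWhile (fun s => decide (pvT s ≤ sim_time)) (a :: rest)).length = 0 := by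
        simp [hle]
      cases i with
      | zero => simpa [hk] using hle
      | succ j =>
        have hj : j < rest.length := by simpa using h
        have := ha rest[j] (List.getElem_mem hj)
        constructor
        · intro hx
          exact absurd (le_trans this (by simpa using hx)) hle
        · intro hx; simp [hk] at hx

-- the bisection returns the boundary index k when lo ≤ k ≤ hi ≤ length and the
-- predicate is an index threshold at k
theorem pvBS_eq (sim_time : Int) (l : List (List (String × Int))) (k : Nat)
    (hth : ∀ i (h : i < l.length), (pvT l[i] ≤ sim_time ↔ i < k)) :
    ∀ d lo hi, hi - lo ≤ d → lo ≤ k → k ≤ hi → hi ≤ l.length →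
      pvBS sim_time l lo hi = k := by
  intro d
  induction d with
  | zero =>
    intro lo hi hd h1 h2 h3
    have : ¬ lo < hi := by omega
    rw [pvBS]; simp [this]; omega
  | succ n ih =>
    intro lo hi hd h1 h2 h3
    rw [pvBS]
    by_cases hlt : lo < hi
    · simp only [hlt, dif_pos]
      have hmid : (lo + hi) / 2 < l.length := by omega
      have hget : l.getD ((lo + hi) / 2) [] = l[(lo + hi) / 2] := List.getD_eq_getElem l [] hmid
      have hiff := hth ((lo + hi) / 2) hmid
      by_cases hp : pvT l[(lo + hi) / 2] ≤ sim_time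
      · have : (lo + hi) / 2 < k := hiff.mp hp
        simp only [hget]
        rw [if_pos hp]
        exact ih _ _ (by omega) (by omega) h2 h3
      · have : k ≤ (lo + hi) / 2 := by
          by_contra hc; exact hp (hiff.mpr (by omega))
        simp only [hget]
        rw [if_neg hp]
        exact ih _ _ (by omega) h1 (by omega) (by omega)
    · simp [hlt]; omega

-- ===== VERDICT (by name: the statement is the Claim_ definition above) =====
theorem latest_detect_before_py_spec : Claim_equal_latest_detect_before_py := by
  intro history target_id sim_time _ hpre
  obtain ⟨hkey, hmono⟩ := hpre
  unfold Spec_latest_detect_before_py latest_detect_before_py latest_detect_before_py_alt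
  set l := PySem.Dict.getD (PySem.Dict.mk history) target_id [] with hl
  set k := (l.takeWhile (fun s => pvT s ≤ sim_time)).length with hkdef
  have hklen : k ≤ l.length := (List.takeWhile_prefix _).length_le
  have hth := pvThreshold sim_time l hmono
  have hbs : pvBS sim_time l 0 l.length = k :=
    pvBS_eq sim_time l k (by simpa [hkdef] using hth) l.length 0 l.length
      (by omega) (by omega) hklen (le_refl _)
  rw [pvGoA_eq sim_time l hkey none, Option.or_none]
  simp only [hbs]
  by_cases hk0 : 0 < k
  · have hpref : (l.takeWhile (fun s => pvT s ≤ sim_time)) <+: l := List.takeWhile_prefix _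
    have hk1 : k - 1 < k := by omega
    have hk1l : k - 1 < l.length := by omega
    have hgl : (l.takeWhile (fun s => pvT s ≤ sim_time)).getLast? =
        some ((l.takeWhile (fun s => pvT s ≤ sim_time))[k - 1]) := by
      rw [List.getLast?_eq_getElem?, List.getElem?_eq_getElem (by omega)]
    have hgeq : (l.takeWhile (fun s => pvT s ≤ sim_time))[k - 1] = l[k - 1] :=
      List.IsPrefix.getElem hpref hk1
    rw [hgl, hgeq, if_pos hk0, List.getElem?_eq_getElem hk1l]
  · have : k = 0 := by omega
    have hnil : l.takeWhile (fun s => pvT s ≤ sim_time) = [] :=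
      List.eq_nil_of_length_eq_zero (by simpa [hkdef] using this)
    simp [hnil, hk0]
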